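-- pv_equiv track=rewrite | github.com/MinDongRyul/baekjoon_code | 백준/Silver/1449. 수리공 항승/수리공 항승.py | func
-- ===== SOURCE A (Python) =====
-- from typing import List
--
-- def func(save:List[int], N:int, L:int) -> int:
--     save = sorted(save)
--     check = [1] * 1001
--     total = 0
--     for idx in range(N):
--         if check[save[idx]]:
--             for save_idx in range(save[idx], save[idx]+L):
--                 if save_idx < 1001:
--                     check[+save_idx] = 0
--             total += 1
--     return total
-- ===== SOURCE B (Python) =====
-- from typing import List
--
-- def func(save: List[int], N: int, L: int) -> int:
--     s = sorted(save)
--     total = 0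
--     reach = None  # first position not covered by the last tape, if any
--     for i in range(N):
--         pos = s[i]
--         if reach is None or pos >= reach:
--             total += 1
--             reach = pos + L
--     return total
-- ===== Notes on version B (the rewrite author's own statement) =====
-- stated objective: simpler
-- what changed: B replaces A's 1001-cell marking array and its per-tape inner marking loop by a single greedy pass over the sorted holes that only tracks the first position not covered by the last tape.
-- outside the precondition, e.g. on func([-1, 1000], 2, 1): A returns 1, B returns 2
import Mathlib
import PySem

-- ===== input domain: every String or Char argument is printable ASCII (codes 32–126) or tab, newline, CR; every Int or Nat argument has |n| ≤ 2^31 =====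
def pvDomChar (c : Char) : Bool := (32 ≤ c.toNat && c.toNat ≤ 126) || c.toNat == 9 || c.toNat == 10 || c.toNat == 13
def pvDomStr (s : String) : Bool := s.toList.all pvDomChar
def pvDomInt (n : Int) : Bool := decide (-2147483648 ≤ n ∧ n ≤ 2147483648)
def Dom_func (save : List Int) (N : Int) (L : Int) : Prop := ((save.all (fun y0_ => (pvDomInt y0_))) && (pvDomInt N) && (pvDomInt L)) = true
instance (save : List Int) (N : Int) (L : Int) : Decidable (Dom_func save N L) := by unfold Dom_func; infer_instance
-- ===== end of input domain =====

-- B: sort once and make a single greedy pass tracking the first uncovered position, instead of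
-- A's per-tape marking loop over a 1001-cell array (objective: simpler; equal return values proved).


-- ===== PORT A =====
-- inner loop: for save_idx in range(v, v+L): if save_idx < 1001: check[save_idx] = 0
def funcMark (ch : List Int) (v : Int) (L : Int) : List Int :=
  (PySem.List.pyRange v (v + L) 1).foldl
    (fun c si => if si < 1001 then PySem.List.pySetD c si 0 else c) ch

def func (save : List Int) (N : Int) (L : Int) : Int :=
  let s := PySem.List.sorted save (fun x => x) false
  let st :=
    (PySem.List.pyRange 0 N 1).foldl
      (fun (st : List Int × Int) idx =>
        let v := PySem.List.pyGetD s idx 0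
        if PySem.List.pyGetD st.1 v 0 ≠ 0 then
          (funcMark st.1 v L, st.2 + 1)
        else st)
      (List.replicate 1001 (1 : Int), 0)
  st.2

-- ===== PORT B =====
def func_alt (save : List Int) (N : Int) (L : Int) : Int :=
  let s := PySem.List.sorted save (fun x => x) false
  let st :=
    (PySem.List.pyRange 0 N 1).foldl
      (fun (st : Int × Option Int) i =>
        let pos := PySem.List.pyGetD s i 0
        match st.2 with
        | none => (st.1 + 1, some (pos + L))
        | some r => if pos ≥ r then (st.1 + 1, some (pos + L)) else st)
      (0, none)
  st.1

-- ===== PRECONDITION & SPEC =====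
-- Pre_ restricts to the problem's natural domain (positions of the holes in 0..1000, as in the
-- Baekjoon statement, whenever any hole is processed at all): outside it A either raises IndexError
-- (N > len(save), or a position above 1000 / below -1001) or indexes its fixed 1001-cell array with
-- Python's negative wraparound, so that tapes placed over negative positions alias cells near 1000.
def Pre_func (save : List Int) (N : Int) (L : Int) : Prop :=
  N ≤ save.length ∧ (0 < N → ∀ x ∈ save, 0 ≤ x ∧ x ≤ 1000)
instance (save : List Int) (N : Int) (L : Int) : Decidable (Pre_func save N L) := by
  unfold Pre_func; infer_instance

def pvWitness_func : List Int × Int × Int := ([3, 1, 8], 3, 2)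

def Spec_func (save : List Int) (N : Int) (L : Int) (out : Int) : Prop := out = func_alt save N L
instance (save : List Int) (N : Int) (L : Int) (out : Int) : Decidable (Spec_func save N L out) := by
  unfold Spec_func; infer_instance

-- ===== CLAIM (what is proved, stated in full; the proofs are below) =====
def Claim_equal_func : Prop := ∀ (save : List Int) (N : Int) (L : Int), Dom_func save N L → Pre_func save N L → Spec_func save N L (func save N L)

-- ===== LEMMAS AND PROOFS =====

-- proof-only names for the two loop bodies (definitionally the lambdas in the ports)
def stepA (L : Int) (st : List Int × Int) (v : Int) : List Int × Int :=
  if PySem.List.pyGetD st.1 v 0 ≠ 0 then (funcMark st.1 v L, st.2 + 1) else st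

def stepB (L : Int) (st : Int × Option Int) (pos : Int) : Int × Option Int :=
  match st.2 with
  | none => (st.1 + 1, some (pos + L))
  | some r => if pos ≥ r then (st.1 + 1, some (pos + L)) else st

theorem funcMark_length (ch : List Int) (v L : Int) :
    (funcMark ch v L).length = ch.length := by
  unfold funcMark
  generalize PySem.List.pyRange v (v + L) 1 = l
  induction l generalizing ch with
  | nil => rfl
  | cons a l ih =>
      simp only [List.foldl_cons]
      rw [ih]
      split
      · exact PySem.List.length_pySetD ch a 0
      · rfl

theorem markFold_get (a b : Int) (ha : 0 ≤ a) (ch : List Int) (hlen : ch.length = 1001)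
    (j : Int) (hj0 : 0 ≤ j) (hj1 : j ≤ 1000) :
    PySem.List.pyGetD ((PySem.List.pyRange a b 1).foldl
      (fun c si => if si < 1001 then PySem.List.pySetD c si 0 else c) ch) j 0
      = if a ≤ j ∧ j < b then 0 else PySem.List.pyGetD ch j 0 := by
  by_cases hab : b ≤ a
  · rw [PySem.List.pyRange_one_eq_nil hab]
    simp only [List.foldl_nil]
    rw [if_neg (show ¬(a ≤ j ∧ j < b) by omega)]
  · have hab' : a < b := by omega
    rw [PySem.List.pyRange_one_cons hab']
    simp only [List.foldl_cons]
    have hlen' : (if a < 1001 then PySem.List.pySetD ch a 0 else ch).length = 1001 := by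
      split
      · rw [PySem.List.length_pySetD]; exact hlen
      · exact hlen
    have ih := markFold_get (a + 1) b (by omega)
      (if a < 1001 then PySem.List.pySetD ch a 0 else ch) hlen' j hj0 hj1
    rw [ih]
    by_cases hmid : a + 1 ≤ j ∧ j < b
    · rw [if_pos hmid, if_pos (show a ≤ j ∧ j < b by omega)]
    · rw [if_neg hmid]
      by_cases hja : j = a
      · subst hja
        rw [if_pos (show j ≤ j ∧ j < b from ⟨le_refl j, hab'⟩),
            if_pos (show j < 1001 by omega)]
        rw [PySem.List.pySetD_of_nonneg ch 0 hj0]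
        rw [PySem.List.pyGetD_eq_getElem _ 0 hj0 (by rw [List.length_set]; omega)]
        rw [List.getElem_set_self (by rw [List.length_set]; omega)]
      · rw [if_neg (show ¬(a ≤ j ∧ j < b) by omega)]
        split
        · rw [PySem.List.pySetD_of_nonneg ch 0 ha]
          rw [PySem.List.pyGetD_eq_getElem _ 0 hj0 (by rw [List.length_set]; omega),
              PySem.List.pyGetD_eq_getElem _ 0 hj0 (by omega)]
          rw [List.getElem_set_ne (by omega)]
        · rfl
termination_by (b - a).toNat
decreasing_by omega

theorem foldl_range_getD {α β : Type} (xs : List α) (n : Nat) (hn : n ≤ xs.length)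
    (f : β → α → β) (d : α) (init : β) :
    (List.range n).foldl (fun acc k => f acc (xs.getD k d)) init
      = (xs.take n).foldl f init := by
  induction n with
  | zero => simp
  | succ m ih =>
      have hm : m < xs.length := by omega
      have ht : xs.take (m + 1) = xs.take m ++ [xs[m]] := by
        rw [List.take_add_one, List.getElem?_eq_getElem hm]; rfl
      rw [List.range_succ, List.foldl_append, ih (by omega), ht, List.foldl_append]
      simp [List.getD, List.getElem?_eq_getElem hm]

-- main loop invariant: A's marking fold and B's greedy fold agree on a sorted list of
-- positions in [0, 1000]
theorem main_inv (L : Int) (t : List Int) (ch : List Int) (total count : Int)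
    (reach : Option Int) (lb : Int)
    (hlen : ch.length = 1001)
    (hsort : t.Pairwise (· ≤ ·))
    (hrange : ∀ x ∈ t, 0 ≤ x ∧ x ≤ 1000)
    (hlb : ∀ x ∈ t, lb ≤ x)
    (hlb0 : 0 ≤ lb)
    (hr : ∀ r, reach = some r → r ≤ lb + L)
    (hinv : ∀ j, lb ≤ j → j ≤ 1000 →
      (PySem.List.pyGetD ch j 0 = 0 ↔ ∃ r, reach = some r ∧ j < r))
    (htc : total = count) :
    (t.foldl (stepA L) (ch, total)).2 = (t.foldl (stepB L) (count, reach)).1 := by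
  induction t generalizing ch total count reach lb with
  | nil => simpa using htc
  | cons v t ih =>
      have hv := hrange v (by simp)
      have hlbv : lb ≤ v := hlb v (by simp)
      have hsort' : t.Pairwise (· ≤ ·) := (List.pairwise_cons.mp hsort).2
      have hhead : ∀ x ∈ t, v ≤ x := (List.pairwise_cons.mp hsort).1
      have hrange' : ∀ x ∈ t, 0 ≤ x ∧ x ≤ 1000 := fun x hx => hrange x (by simp [hx])
      have hquery := hinv v hlbv hv.2
      simp only [List.foldl_cons]
      by_cases hcov : ∃ r, reach = some r ∧ v < r
      · -- covered: both sides skip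
        obtain ⟨r, hreq, hvr⟩ := hcov
        subst hreq
        have hA : stepA L (ch, total) v = (ch, total) := by
          rw [stepA, if_neg (by simp [hquery.mpr ⟨r, rfl, hvr⟩])]
        have hB : stepB L (count, some r) v = (count, some r) := by
          rw [stepB]
          simp only []
          rw [if_neg (by omega)]
        rw [hA, hB]
        exact ih ch total count (some r) v hlen hsort' hrange' hhead hv.1
          (fun r' hr' => by have := hr r' hr'; simp at hr'; omega)
          (fun j hj hj1 => hinv j (by omega) hj1) htc
      · -- not covered: both sides place a tape at v
        have h0 : PySem.List.pyGetD ch v 0 ≠ 0 := fun h => hcov (hquery.mp h)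
        have hA : stepA L (ch, total) v = (funcMark ch v L, total + 1) := by
          rw [stepA, if_pos h0]
        have hB : stepB L (count, reach) v = (count + 1, some (v + L)) := by
          cases hre : reach with
          | none => rw [stepB]
          | some r =>
              have hrv : r ≤ v := by
                by_contra hc
                exact hcov ⟨r, hre, by omega⟩
              rw [stepB]
              simp only []
              rw [if_pos (by omega)]
        rw [hA, hB]
        have hlen2 : (funcMark ch v L).length = 1001 := by
          rw [funcMark_length]; exact hlen
        refine ih (funcMark ch v L) (total + 1) (count + 1) (some (v + L)) v
          hlen2 hsort' hrange' hhead hv.1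
          (fun r' hr' => by simp at hr'; omega)
          (fun j hj hj1 => ?_) (by omega)
        unfold funcMark
        rw [markFold_get v (v + L) hv.1 ch hlen j (by omega) hj1]
        constructor
        · intro hz
          refine ⟨v + L, rfl, ?_⟩
          by_cases hjl : v ≤ j ∧ j < v + L
          · omega
          · rw [if_neg hjl] at hz
            obtain ⟨r', hre, hjr⟩ := (hinv j (by omega) hj1).mp hz
            have := hr r' hre
            omega
        · rintro ⟨r', hr', hjr⟩
          simp only [Option.some.injEq] at hr'
          rw [if_pos (show v ≤ j ∧ j < v + L by omega)]

-- ===== VERDICT (by name: the statement is the Claim_ definition above) =====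
theorem func_spec : Claim_equal_func := by
  intro save N L hdom hpre
  obtain ⟨hNlen, hbounds⟩ := hpre
  unfold Spec_func func func_alt
  simp only []
  have hslen : (PySem.List.sorted save (fun x => x) false).length = save.length :=
    PySem.List.length_sorted save _ false
  have hmem : ∀ x ∈ PySem.List.sorted save (fun x => x) false, x ∈ save :=
    fun x hx => (PySem.List.mem_sorted save (fun x => x) false x).mp hx
  set s := PySem.List.sorted save (fun x => x) false with hs
  -- both index loops over range(N) are folds over the first N sorted holes
  rw [PySem.List.pyRange_one 0 N, List.foldl_map, List.foldl_map]
  simp only [zero_add, PySem.List.pyGetD_natCast, Int.sub_zero]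
  show (List.foldl (fun (acc : List Int × Int) (k : Nat) => stepA L acc (s.getD k 0))
      (List.replicate 1001 1, 0) (List.range N.toNat)).2
    = (List.foldl (fun (acc : Int × Option Int) (k : Nat) => stepB L acc (s.getD k 0))
      (0, none) (List.range N.toNat)).1
  rw [foldl_range_getD s N.toNat (by omega) (stepA L) 0 _,
      foldl_range_getD s N.toNat (by omega) (stepB L) 0 _]
  have htake : ∀ x ∈ s.take N.toNat, 0 ≤ x ∧ x ≤ 1000 := by
    intro x hx
    by_cases hN : 0 < N
    · exact hbounds hN x (hmem x (List.mem_of_mem_take hx))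
    · rw [show N.toNat = 0 by omega] at hx
      simp at hx
  refine main_inv L (s.take N.toNat) (List.replicate 1001 1) 0 0 none 0
    (by rw [List.length_replicate]) ?_ htake ?_ le_rfl (fun r hr => by cases hr) ?_ rfl
  · exact List.Pairwise.sublist (List.take_sublist _ _)
      (PySem.List.sorted_pairwise save (fun x => x))
  · exact fun x hx => (htake x hx).1
  · intro j hj0 hj1
    rw [PySem.List.pyGetD_eq_getElem _ 0 hj0 (by rw [List.length_replicate]; omega)]
    rw [List.getElem_replicate]
    constructor
    · intro h; cases h
    · rintro ⟨r, hr, -⟩; cases hr
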